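-- pv_equiv track=rewrite | github.com/ddeemerpurdue/GrowthCurveAnalysis | parseGrowthCurves.py | getGrowthIntervalFromFull
-- ===== SOURCE A (Python) =====
-- def getGrowthIntervalFromFull(all_times, all_values):
--     # Step 1: create a window of size N and get the slope
--     start_index = 0
--     start_growth_time = all_times[0]
--     start_growth_value = all_values[0]
--     steps = 0
--     step_threshold_start = 7
--     window_size = 3
--     window_end = len(all_values) - (window_size - 1)
--     for window in range(window_end):
--         current_values = all_values[window:window + window_size]
--         if current_values[-1] > current_values[0]:
--             if steps == 0:
--                 seed_time = all_times[window]
--                 seed_value = all_values[window]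
--                 seed_index = window
--             steps += 1
--         else:
--             steps = 0
--         if steps > step_threshold_start:
--             start_growth_time, start_growth_value = seed_time, seed_value
--             start_index = seed_index
--             break
--     steps = 0
--     step_threshold_end = 2
--     window = 2
--     for window in range(start_index, window_end):
--         current_values = all_values[window:window + window_size]
--         # Below, we can attenuate the ramp rate for better end prediction
--         if current_values[0] > current_values[-1]:
--             if steps == 0:
--                 seed_time = all_times[window]
--                 seed_value = all_values[window]
--                 seed_index = window
--             steps += 1
--         else:
--             steps = 0
--         if steps > step_threshold_end:
--             end_growth_time, end_growth_value = seed_time, seed_value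
--             end_index = seed_index
--             return [start_index, end_index, start_growth_time, start_growth_value,
--                     end_growth_time, end_growth_value]
--     end_index = window
--     # Below, since > 24 hours, need to manually specify 24 hours + 7 seconds
--     end_growth_time, end_growth_value = 80000, all_values[-1]
--     return [start_index, end_index, start_growth_time, start_growth_value,
--             end_growth_time, end_growth_value]
-- ===== SOURCE B (Python) =====
-- def getGrowthIntervalFromFull(all_times, all_values):
--     # Direct search over window comparisons: find the first index j whose 8
--     # preceding windows are all rising (growth start = j-7), then the first
--     # index whose 3 preceding windows are all falling (growth end).
--     window_end = len(all_values) - 2  # number of size-3 windows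
--     rising = lambda i: all_values[i + 2] > all_values[i]
--     falling = lambda i: all_values[i] > all_values[i + 2]
--
--     start_index = next((j - 7 for j in range(7, window_end)
--                         if all(rising(i) for i in range(j - 7, j + 1))), None)
--     if start_index is None:
--         start_index = 0
--         start_growth_time, start_growth_value = all_times[0], all_values[0]
--     else:
--         start_growth_time = all_times[start_index]
--         start_growth_value = all_values[start_index]
--
--     end_index = next((j - 2 for j in range(start_index + 2, window_end)
--                       if falling(j - 2) and falling(j - 1) and falling(j)), None)
--     if end_index is not None:
--         return [start_index, end_index, start_growth_time, start_growth_value,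
--                 all_times[end_index], all_values[end_index]]
--     return [start_index, window_end - 1, start_growth_time, start_growth_value,
--             80000, all_values[-1]]
-- ===== Notes on version B (the rewrite author's own statement) =====
-- stated objective: alternative
-- what changed: A streams over the windows with a streak counter, seed bookkeeping and break; B searches directly for the first index j whose preceding 8 (resp. 3) window comparisons are all rising (resp. falling) and takes j-7 (resp. j-2) as the interval bound. Pre_ excludes value lists shorter than one window (len < 3, a degenerate corner with no windows where A's fall-through end_index is a leftover loop variable and no value is meaningful) and times lists too short for the windows, on which A raises IndexError whenever it seeds a streak.
-- outside the precondition, e.g. on getGrowthIntervalFromFull([0], [1, 1]): A returns [0, 2, 0, 1, 80000, 1], B returns [0, -1, 0, 1, 80000, 1]; on getGrowthIntervalFromFull([0], [5, 1, 2, 3, 4, 5, 6, 7, 8, 9]): A raises IndexError, B returns [0, 7, 0, 5, 80000, 9]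
import Mathlib
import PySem

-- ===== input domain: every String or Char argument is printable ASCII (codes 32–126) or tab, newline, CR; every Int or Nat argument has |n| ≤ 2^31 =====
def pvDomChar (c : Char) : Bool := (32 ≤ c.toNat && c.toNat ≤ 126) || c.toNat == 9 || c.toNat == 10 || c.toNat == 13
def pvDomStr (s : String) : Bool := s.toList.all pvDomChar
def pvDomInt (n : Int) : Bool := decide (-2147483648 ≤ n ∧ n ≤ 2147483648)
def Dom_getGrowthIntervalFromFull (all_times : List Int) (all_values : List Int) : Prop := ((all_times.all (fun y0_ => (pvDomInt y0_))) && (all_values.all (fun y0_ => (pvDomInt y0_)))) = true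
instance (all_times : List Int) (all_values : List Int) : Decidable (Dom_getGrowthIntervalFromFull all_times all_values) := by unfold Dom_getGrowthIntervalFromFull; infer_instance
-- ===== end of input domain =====

-- B replaces A's streaming streak-counter with a direct search for the first index whose
-- preceding 8 (resp. 3) window comparisons are all rising (resp. falling) — objective: alternative.

-- ===== PORT A =====
-- first for-loop: state (steps, seed_time, seed_value, seed_index); some = break with
-- (start_index, start_growth_time, start_growth_value), none = loop ran to the end.
-- all_times[window] / all_values[window] are in range under Pre_; pyGetD's default is unreachable there.
def loopStartA (ts vs : List Int) (idxs : List Int) (steps sT sV sI : Int) :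
    Option (Int × Int × Int) :=
  match idxs with
  | [] => none
  | w :: rest =>
    let cv := PySem.List.slice vs (some w) (some (w + 3))
    let st : Int × Int × Int × Int :=
      if PySem.List.pyGetD cv (-1) 0 > PySem.List.pyGetD cv 0 0 then
        if steps == 0 then
          (steps + 1, PySem.List.pyGetD ts w 0, PySem.List.pyGetD vs w 0, w)
        else (steps + 1, sT, sV, sI)
      else (0, sT, sV, sI)
    if st.1 > 7 then some (st.2.2.2, st.2.1, st.2.2.1)
    else loopStartA ts vs rest st.1 st.2.1 st.2.2.1 st.2.2.2

-- second for-loop: additionally carries the Python variable `window` (last iterated index,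
-- pre-initialised to 2); .inl = early return data, .inr = fall-through value of `window`.
def loopEndA (ts vs : List Int) (idxs : List Int) (steps sT sV sI lastw : Int) :
    (Int × Int × Int) ⊕ Int :=
  match idxs with
  | [] => Sum.inr lastw
  | w :: rest =>
    let cv := PySem.List.slice vs (some w) (some (w + 3))
    let st : Int × Int × Int × Int :=
      if PySem.List.pyGetD cv 0 0 > PySem.List.pyGetD cv (-1) 0 then
        if steps == 0 then
          (steps + 1, PySem.List.pyGetD ts w 0, PySem.List.pyGetD vs w 0, w)
        else (steps + 1, sT, sV, sI)
      else (0, sT, sV, sI)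
    if st.1 > 2 then Sum.inl (st.2.2.2, st.2.1, st.2.2.1)
    else loopEndA ts vs rest st.1 st.2.1 st.2.2.1 st.2.2.2 w

def getGrowthIntervalFromFull (all_times : List Int) (all_values : List Int) : List Int :=
  let start_growth_time := PySem.List.pyGetD all_times 0 0
  let start_growth_value := PySem.List.pyGetD all_values 0 0
  let window_end : Int := (all_values.length : Int) - (3 - 1)
  let start :=
    match loopStartA all_times all_values (PySem.List.pyRange 0 window_end 1) 0 0 0 0 with
    | some r => r
    | none => (0, start_growth_time, start_growth_value)
  match loopEndA all_times all_values (PySem.List.pyRange start.1 window_end 1) 0 0 0 0 2 with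
  | Sum.inl e => [start.1, e.1, start.2.1, start.2.2, e.2.1, e.2.2]
  | Sum.inr w =>
      [start.1, w, start.2.1, start.2.2, 80000, PySem.List.pyGetD all_values (-1) 0]

-- ===== PORT B =====
def getGrowthIntervalFromFull_alt (all_times : List Int) (all_values : List Int) : List Int :=
  let window_end : Int := (all_values.length : Int) - 2
  let rising : Int → Bool := fun i =>
    decide (PySem.List.pyGetD all_values (i + 2) 0 > PySem.List.pyGetD all_values i 0)
  let falling : Int → Bool := fun i =>
    decide (PySem.List.pyGetD all_values i 0 > PySem.List.pyGetD all_values (i + 2) 0)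
  let start :=
    match ((PySem.List.pyRange 7 window_end 1).find?
        (fun j => (PySem.List.pyRange (j - 7) (j + 1) 1).all rising)).map (fun j => j - 7) with
    | none => ((0 : Int), PySem.List.pyGetD all_times 0 0, PySem.List.pyGetD all_values 0 0)
    | some s => (s, PySem.List.pyGetD all_times s 0, PySem.List.pyGetD all_values s 0)
  match ((PySem.List.pyRange (start.1 + 2) window_end 1).find?
      (fun j => falling (j - 2) && falling (j - 1) && falling j)).map (fun j => j - 2) with
  | some e =>
      [start.1, e, start.2.1, start.2.2,
       PySem.List.pyGetD all_times e 0, PySem.List.pyGetD all_values e 0]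
  | none =>
      [start.1, window_end - 1, start.2.1, start.2.2,
       80000, PySem.List.pyGetD all_values (-1) 0]

-- ===== PRECONDITION & SPEC =====
-- Pre_ excludes value lists shorter than one window (len < 3): that degenerate corner has no
-- windows and A's fall-through end_index there is a leftover loop variable (2), a value no
-- specification would fix; and all_times lists too short for the window count, on which the
-- Python A raises IndexError whenever it seeds a streak past the end of all_times (on
-- streak-free data A happens to return, reading only index 0 — such inputs are excluded too).
def Pre_getGrowthIntervalFromFull (all_times : List Int) (all_values : List Int) : Prop :=
  3 ≤ all_values.length ∧ all_values.length ≤ all_times.length + 2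
instance (all_times : List Int) (all_values : List Int) : Decidable (Pre_getGrowthIntervalFromFull all_times all_values) := by unfold Pre_getGrowthIntervalFromFull; infer_instance

def pvWitness_getGrowthIntervalFromFull : List Int × List Int := ([3, 1, 4, 1, 5], [2, 7, 1, 8, 2, 8, 1])

def Spec_getGrowthIntervalFromFull (all_times : List Int) (all_values : List Int) (out : List Int) : Prop := out = getGrowthIntervalFromFull_alt all_times all_values
instance (all_times : List Int) (all_values : List Int) (out : List Int) : Decidable (Spec_getGrowthIntervalFromFull all_times all_values out) := by unfold Spec_getGrowthIntervalFromFull; infer_instance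

-- ===== CLAIM (what is proved, stated in full; the proofs are below) =====
def Claim_equal_getGrowthIntervalFromFull : Prop := ∀ (all_times : List Int) (all_values : List Int), Dom_getGrowthIntervalFromFull all_times all_values → Pre_getGrowthIntervalFromFull all_times all_values → Spec_getGrowthIntervalFromFull all_times all_values (getGrowthIntervalFromFull all_times all_values)

-- ===== LEMMAS AND PROOFS =====

-- rising / falling window comparison, as used by both ports
def Rb (vs : List Int) (i : Int) : Bool :=
  decide (PySem.List.pyGetD vs (i + 2) 0 > PySem.List.pyGetD vs i 0)
def Fb (vs : List Int) (i : Int) : Bool :=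
  decide (PySem.List.pyGetD vs i 0 > PySem.List.pyGetD vs (i + 2) 0)

theorem pyRange_one_nil {a b : Int} (h : b ≤ a) : PySem.List.pyRange a b 1 = [] := by
  rw [PySem.List.pyRange_one]
  have : (b - a).toNat = 0 := by omega
  simp [this]

theorem find?_skip {p : Int → Bool} (we : Int) :
    ∀ (n : Nat) (c c' : Int), c ≤ c' → (c' - c).toNat ≤ n →
    (∀ j, c ≤ j → j < c' → p j = false) →
    (PySem.List.pyRange c we 1).find? p = (PySem.List.pyRange c' we 1).find? p := by
  intro n
  induction n with
  | zero =>
    intro c c' hle hn _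
    have : c = c' := by omega
    rw [this]
  | succ n ih =>
    intro c c' hle hn hf
    by_cases hcc : c = c'
    · rw [hcc]
    · have hlt : c < c' := lt_of_le_of_ne hle hcc
      by_cases hw : c < we
      · rw [PySem.List.pyRange_one_cons hw, List.find?_cons, hf c le_rfl hlt]
        exact ih (c + 1) c' (by omega) (by omega) (fun j h1 h2 => hf j (by omega) h2)
      · rw [pyRange_one_nil (by omega), pyRange_one_nil (by omega)]

theorem all_pyRange_iff {p : Int → Bool} {a b : Int} :
    (PySem.List.pyRange a b 1).all p = true ↔ ∀ j, a ≤ j → j < b → p j = true := by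
  rw [List.all_eq_true]
  constructor
  · intro h j h1 h2
    exact h j (PySem.List.mem_pyRange_one.mpr ⟨h1, h2⟩)
  · intro h x hx
    obtain ⟨h1, h2⟩ := PySem.List.mem_pyRange_one.mp hx
    exact h x h1 h2

-- the window-slice comparison of port A equals the direct two-point comparison
theorem slice_cmp (vs : List Int) (w : Int) (h0 : 0 ≤ w) (hw : w < (vs.length : Int) - 2) :
    PySem.List.pyGetD (PySem.List.slice vs (some w) (some (w + 3))) (-1) 0 =
      PySem.List.pyGetD vs (w + 2) 0 ∧
    PySem.List.pyGetD (PySem.List.slice vs (some w) (some (w + 3))) 0 0 =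
      PySem.List.pyGetD vs w 0 := by
  obtain ⟨k, rfl⟩ : ∃ k : Nat, w = (k : Int) := ⟨w.toNat, (Int.toNat_of_nonneg h0).symm⟩
  have hk : k + 2 < vs.length := by omega
  rw [show ((k : Int) + 3) = ((k : Int) + ((3 : Nat) : Int)) by norm_num,
    PySem.List.slice_natCast_add]
  have hl : (List.take 3 (List.drop k vs)).length = 3 := by
    simp [List.length_take, List.length_drop]; omega
  have hne : List.take 3 (List.drop k vs) ≠ [] := by
    intro h; rw [h] at hl; simp at hl
  constructor
  · rw [PySem.List.pyGetD_neg_one _ _ hne, List.getLast_eq_getElem,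
      show ((k : Int) + 2) = (((k + 2 : Nat)) : Int) by push_cast; ring,
      PySem.List.pyGetD_natCast, List.getD_eq_getElem _ _ hk]
    simp only [hl]
    rw [List.getElem_take, List.getElem_drop]
  · rw [PySem.List.pyGetD_zero, PySem.List.pyGetD_natCast,
      List.getD_eq_getElem _ _ (by omega : (0:Nat) < (List.take 3 (List.drop k vs)).length),
      List.getD_eq_getElem _ _ (by omega : k < vs.length)]
    rw [List.getElem_take, List.getElem_drop]
    simp

theorem loopStartA_eq (ts vs : List Int) :
    ∀ (n : Nat) (a s sT sV sI : Int),
    ((vs.length : Int) - 2 - a).toNat ≤ n →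
    0 ≤ s → s ≤ 7 → s ≤ a →
    (∀ i, a - s ≤ i → i < a → Rb vs i = true) →
    (a - s = 0 ∨ Rb vs (a - s - 1) = false) →
    (0 < s → sI = a - s ∧ sT = PySem.List.pyGetD ts (a - s) 0 ∧
      sV = PySem.List.pyGetD vs (a - s) 0) →
    loopStartA ts vs (PySem.List.pyRange a ((vs.length : Int) - 2) 1) s sT sV sI =
      ((PySem.List.pyRange (a + 7 - s) ((vs.length : Int) - 2) 1).find?
          (fun j => (PySem.List.pyRange (j - 7) (j + 1) 1).all (Rb vs))).map
        (fun j => (j - 7, PySem.List.pyGetD ts (j - 7) 0, PySem.List.pyGetD vs (j - 7) 0)) := by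
  intro n
  induction n with
  | zero =>
    intro a s sT sV sI hn hs0 hs7 hsa hrun hmax hseed
    rw [pyRange_one_nil (by omega), pyRange_one_nil (by omega)]
    simp [loopStartA]
  | succ n ih =>
    intro a s sT sV sI hn hs0 hs7 hsa hrun hmax hseed
    by_cases hav : a < (vs.length : Int) - 2
    · rw [PySem.List.pyRange_one_cons hav]
      simp only [loopStartA]
      obtain ⟨e1, e2⟩ := slice_cmp vs a (by omega) hav
      rw [e1, e2]
      by_cases hR : PySem.List.pyGetD vs (a + 2) 0 > PySem.List.pyGetD vs a 0
      · have hRb : Rb vs a = true := decide_eq_true hR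
        by_cases hs : s = 0
        · subst hs
          rw [if_pos hR, if_pos (by norm_num : ((0:Int) == 0) = true)]
          simp only []
          rw [if_neg (by norm_num : ¬ ((0:Int) + 1 > 7)),
            show ((0:Int) + 1) = 1 from by norm_num]
          rw [ih (a + 1) 1 (PySem.List.pyGetD ts a 0) (PySem.List.pyGetD vs a 0) a
            (by omega) (by norm_num) (by norm_num) (by omega)
            (fun i h1 h2 => by
              have hi : i = a := by omega
              rw [hi]; exact hRb)
            (by
              rcases hmax with h | h
              · left; omega
              · right
                rw [show (a + 1 - 1 - 1 : Int) = a - 0 - 1 by ring]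
                exact h)
            (fun _ => ⟨by ring, by rw [show (a + 1 - 1 : Int) = a by ring],
              by rw [show (a + 1 - 1 : Int) = a by ring]⟩)]
          rw [show (a + 1 + 7 - 1 : Int) = a + 7 - 0 by ring]
        · rw [if_pos hR, if_neg (show ¬ ((s == 0) = true) from by simp [hs])]
          simp only []
          by_cases hs7' : s = 7
          · subst hs7'
            rw [if_pos (by norm_num : (7:Int) + 1 > 7)]
            obtain ⟨hI, hT, hV⟩ := hseed (by norm_num)
            rw [show (a + 7 - 7 : Int) = a by ring,
              PySem.List.pyRange_one_cons hav]
            have hpa : ((PySem.List.pyRange (a - 7) (a + 1) 1).all (Rb vs)) = true := by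
              rw [all_pyRange_iff]
              intro j h1 h2
              by_cases hja : j = a
              · rw [hja]; exact hRb
              · exact hrun j (by omega) (by omega)
            rw [List.find?_cons_of_pos (by simpa using hpa)]
            simp only [Option.map_some]
            rw [hI, hT, hV]
          · rw [if_neg (by omega : ¬ (s + 1 > 7))]
            obtain ⟨hI, hT, hV⟩ := hseed (by omega)
            rw [ih (a + 1) (s + 1) sT sV sI
              (by omega) (by omega) (by omega) (by omega)
              (fun i h1 h2 => by
                by_cases hia : i = a
                · rw [hia]; exact hRb
                · exact hrun i (by omega) (by omega))
              (by
                rcases hmax with h | h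
                · left; omega
                · right
                  rw [show (a + 1 - (s + 1) - 1 : Int) = a - s - 1 by ring]
                  exact h)
              (fun _ => ⟨by rw [hI]; ring, by rw [hT, show (a + 1 - (s + 1) : Int) = a - s by ring],
                by rw [hV, show (a + 1 - (s + 1) : Int) = a - s by ring]⟩)]
            rw [show (a + 1 + 7 - (s + 1) : Int) = a + 7 - s by ring]
      · have hRb : Rb vs a = false := decide_eq_false hR
        rw [if_neg hR]
        simp only []
        rw [if_neg (by norm_num : ¬ ((0:Int) > 7))]
        rw [ih (a + 1) 0 sT sV sI (by omega) (by norm_num) (by norm_num) (by omega)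
          (fun i h1 h2 => absurd (lt_of_le_of_lt h1 h2) (by omega))
          (by
            right
            rw [show (a + 1 - 0 - 1 : Int) = a by ring]
            exact hRb)
          (fun h => absurd h (by norm_num))]
        have hf : ∀ j, a + 7 - s ≤ j → j < a + 8 →
            ((PySem.List.pyRange (j - 7) (j + 1) 1).all (Rb vs)) = false := by
          intro j h1 h2
          apply Bool.eq_false_iff.mpr
          intro hall
          have := all_pyRange_iff.mp hall a (by omega) (by omega)
          rw [hRb] at this
          exact Bool.false_ne_true this
        rw [show (a + 1 + 7 - 0 : Int) = a + 8 by ring,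
          find?_skip _ 8 (a + 7 - s) (a + 8) (by omega) (by omega) hf]
    · rw [pyRange_one_nil (by omega), pyRange_one_nil (by omega)]
      simp [loopStartA]

theorem loopEndA_eq (ts vs : List Int) (b : Int) (hb : 0 ≤ b) :
    ∀ (n : Nat) (a s sT sV sI lastw : Int),
    ((vs.length : Int) - 2 - a).toNat ≤ n →
    0 ≤ s → s ≤ 2 → b ≤ a - s →
    (∀ i, a - s ≤ i → i < a → Fb vs i = true) →
    (a - s = b ∨ Fb vs (a - s - 1) = false) →
    (0 < s → sI = a - s ∧ sT = PySem.List.pyGetD ts (a - s) 0 ∧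
      sV = PySem.List.pyGetD vs (a - s) 0) →
    loopEndA ts vs (PySem.List.pyRange a ((vs.length : Int) - 2) 1) s sT sV sI lastw =
      (match (PySem.List.pyRange (a + 2 - s) ((vs.length : Int) - 2) 1).find?
          (fun j => Fb vs (j - 2) && Fb vs (j - 1) && Fb vs j) with
      | some j => Sum.inl (j - 2, PySem.List.pyGetD ts (j - 2) 0, PySem.List.pyGetD vs (j - 2) 0)
      | none => Sum.inr (if a < (vs.length : Int) - 2 then (vs.length : Int) - 2 - 1 else lastw)) := by
  intro n
  induction n with
  | zero =>
    intro a s sT sV sI lastw hn hs0 hs2 hba hrun hmax hseed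
    rw [pyRange_one_nil (by omega), pyRange_one_nil (by omega)]
    simp only [loopEndA, List.find?_nil]
    rw [if_neg (by omega)]
  | succ n ih =>
    intro a s sT sV sI lastw hn hs0 hs2 hba hrun hmax hseed
    by_cases hav : a < (vs.length : Int) - 2
    · rw [PySem.List.pyRange_one_cons hav]
      simp only [loopEndA]
      obtain ⟨e1, e2⟩ := slice_cmp vs a (by omega) hav
      rw [e1, e2]
      have hfix : (if a + 1 < (vs.length : Int) - 2 then (vs.length : Int) - 2 - 1 else a) =
          (if a < (vs.length : Int) - 2 then (vs.length : Int) - 2 - 1 else lastw) := by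
        split_ifs <;> omega
      by_cases hF : PySem.List.pyGetD vs a 0 > PySem.List.pyGetD vs (a + 2) 0
      · have hFb : Fb vs a = true := decide_eq_true hF
        by_cases hs : s = 0
        · subst hs
          rw [if_pos hF, if_pos (by norm_num : ((0:Int) == 0) = true)]
          simp only []
          rw [if_neg (by norm_num : ¬ ((0:Int) + 1 > 2)),
            show ((0:Int) + 1) = 1 from by norm_num]
          rw [ih (a + 1) 1 (PySem.List.pyGetD ts a 0) (PySem.List.pyGetD vs a 0) a a
            (by omega) (by norm_num) (by norm_num) (by omega)
            (fun i h1 h2 => by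
              have hi : i = a := by omega
              rw [hi]; exact hFb)
            (by
              rcases hmax with h | h
              · left; omega
              · right
                rw [show (a + 1 - 1 - 1 : Int) = a - 0 - 1 by ring]
                exact h)
            (fun _ => ⟨by ring, by rw [show (a + 1 - 1 : Int) = a by ring],
              by rw [show (a + 1 - 1 : Int) = a by ring]⟩)]
          rw [show (a + 1 + 2 - 1 : Int) = a + 2 - 0 by ring, hfix]
        · rw [if_pos hF, if_neg (show ¬ ((s == 0) = true) from by simp [hs])]
          simp only []
          by_cases hs2' : s = 2
          · subst hs2'
            rw [if_pos (by norm_num : (2:Int) + 1 > 2)]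
            obtain ⟨hI, hT, hV⟩ := hseed (by norm_num)
            rw [show (a + 2 - 2 : Int) = a by ring, PySem.List.pyRange_one_cons hav]
            have hpa : (Fb vs (a - 2) && Fb vs (a - 1) && Fb vs a) = true := by
              rw [hrun (a - 2) (by omega) (by omega), hrun (a - 1) (by omega) (by omega), hFb]
              rfl
            rw [List.find?_cons_of_pos (by simpa using hpa)]
            simp only []
            rw [hI, hT, hV]
          · rw [if_neg (by omega : ¬ (s + 1 > 2))]
            obtain ⟨hI, hT, hV⟩ := hseed (by omega)
            rw [ih (a + 1) (s + 1) sT sV sI a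
              (by omega) (by omega) (by omega) (by omega)
              (fun i h1 h2 => by
                by_cases hia : i = a
                · rw [hia]; exact hFb
                · exact hrun i (by omega) (by omega))
              (by
                rcases hmax with h | h
                · left; omega
                · right
                  rw [show (a + 1 - (s + 1) - 1 : Int) = a - s - 1 by ring]
                  exact h)
              (fun _ => ⟨by rw [hI]; ring, by rw [hT, show (a + 1 - (s + 1) : Int) = a - s by ring],
                by rw [hV, show (a + 1 - (s + 1) : Int) = a - s by ring]⟩)]
            rw [show (a + 1 + 2 - (s + 1) : Int) = a + 2 - s by ring, hfix]
      · have hFb : Fb vs a = false := decide_eq_false hF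
        rw [if_neg hF]
        simp only []
        rw [if_neg (by norm_num : ¬ ((0:Int) > 2))]
        rw [ih (a + 1) 0 sT sV sI a (by omega) (by norm_num) (by norm_num) (by omega)
          (fun i h1 h2 => absurd (lt_of_le_of_lt h1 h2) (by omega))
          (by
            right
            rw [show (a + 1 - 0 - 1 : Int) = a by ring]
            exact hFb)
          (fun h => absurd h (by norm_num))]
        have hf : ∀ j, a + 2 - s ≤ j → j < a + 3 →
            (Fb vs (j - 2) && Fb vs (j - 1) && Fb vs j) = false := by
          intro j h1 h2
          have hcase : a = j - 2 ∨ a = j - 1 ∨ a = j := by omega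
          rcases hcase with h | h | h <;> rw [← h] <;> simp [hFb]
        rw [show (a + 1 + 2 - 0 : Int) = a + 3 by ring,
          find?_skip _ 3 (a + 2 - s) (a + 3) (by omega) (by omega) hf, hfix]
    · rw [pyRange_one_nil (by omega), pyRange_one_nil (by omega)]
      simp only [loopEndA, List.find?_nil]
      rw [if_neg (by omega)]

theorem main_eq (ts vs : List Int) (h3 : 3 ≤ vs.length) :
    getGrowthIntervalFromFull ts vs = getGrowthIntervalFromFull_alt ts vs := by
  simp only [getGrowthIntervalFromFull, getGrowthIntervalFromFull_alt]
  rw [show ((3:Int) - 1) = 2 from by norm_num]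
  have hRe : Rb vs = (fun i =>
      decide (PySem.List.pyGetD vs (i + 2) 0 > PySem.List.pyGetD vs i 0)) := rfl
  have hFe : (fun j => Fb vs (j - 2) && Fb vs (j - 1) && Fb vs j) = (fun j =>
      decide (PySem.List.pyGetD vs (j - 2) 0 > PySem.List.pyGetD vs (j - 2 + 2) 0) &&
      decide (PySem.List.pyGetD vs (j - 1) 0 > PySem.List.pyGetD vs (j - 1 + 2) 0) &&
      decide (PySem.List.pyGetD vs j 0 > PySem.List.pyGetD vs (j + 2) 0)) := rfl
  rw [loopStartA_eq ts vs ((vs.length : Int) - 2 - 0).toNat 0 0 0 0 0 le_rfl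
    le_rfl (by norm_num) le_rfl
    (fun i h1 h2 => absurd (lt_of_le_of_lt h1 h2) (by omega))
    (Or.inl (by norm_num))
    (fun h => absurd h (by norm_num))]
  rw [show ((0:Int) + 7 - 0) = 7 from by norm_num, hRe]
  cases hfind : (PySem.List.pyRange 7 ((vs.length : Int) - 2) 1).find?
      (fun j => (PySem.List.pyRange (j - 7) (j + 1) 1).all
        (fun i => decide (PySem.List.pyGetD vs (i + 2) 0 > PySem.List.pyGetD vs i 0))) with
  | none =>
    simp only [Option.map_none]
    rw [loopEndA_eq ts vs 0 le_rfl ((vs.length : Int) - 2 - 0).toNat 0 0 0 0 0 2 le_rfl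
      le_rfl (by norm_num) le_rfl
      (fun i h1 h2 => absurd (lt_of_le_of_lt h1 h2) (by omega))
      (Or.inl (by norm_num))
      (fun h => absurd h (by norm_num))]
    rw [show ((0:Int) + 2 - 0) = 0 + 2 from by norm_num, hFe]
    cases hfind2 : (PySem.List.pyRange (0 + 2) ((vs.length : Int) - 2) 1).find?
        (fun j =>
          decide (PySem.List.pyGetD vs (j - 2) 0 > PySem.List.pyGetD vs (j - 2 + 2) 0) &&
          decide (PySem.List.pyGetD vs (j - 1) 0 > PySem.List.pyGetD vs (j - 1 + 2) 0) &&
          decide (PySem.List.pyGetD vs j 0 > PySem.List.pyGetD vs (j + 2) 0)) with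
    | none =>
      simp only [Option.map_none]
      rw [if_pos (by omega : (0:Int) < (vs.length : Int) - 2)]
    | some j =>
      simp only [Option.map_some]
  | some j =>
    have hj := PySem.List.mem_pyRange_one.mp (List.mem_of_find?_eq_some hfind)
    simp only [Option.map_some]
    rw [loopEndA_eq ts vs (j - 7) (by omega) ((vs.length : Int) - 2 - (j - 7)).toNat
      (j - 7) 0 0 0 0 2 le_rfl
      le_rfl (by norm_num) (by omega)
      (fun i h1 h2 => absurd (lt_of_le_of_lt h1 h2) (by omega))
      (Or.inl (by ring))
      (fun h => absurd h (by norm_num))]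
    rw [show ((j:Int) - 7 + 2 - 0) = j - 7 + 2 from by ring, hFe]
    cases hfind2 : (PySem.List.pyRange (j - 7 + 2) ((vs.length : Int) - 2) 1).find?
        (fun j =>
          decide (PySem.List.pyGetD vs (j - 2) 0 > PySem.List.pyGetD vs (j - 2 + 2) 0) &&
          decide (PySem.List.pyGetD vs (j - 1) 0 > PySem.List.pyGetD vs (j - 1 + 2) 0) &&
          decide (PySem.List.pyGetD vs j 0 > PySem.List.pyGetD vs (j + 2) 0)) with
    | none =>
      simp only [Option.map_none]
      rw [if_pos (by omega : (j:Int) - 7 < (vs.length : Int) - 2)]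
    | some j2 =>
      simp only [Option.map_some]

-- ===== VERDICT (by name: the statement is the Claim_ definition above) =====
theorem getGrowthIntervalFromFull_spec : Claim_equal_getGrowthIntervalFromFull := by
  intro ts vs _ hpre
  exact main_eq ts vs hpre.1
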